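-- pv_equiv track=rewrite | github.com/Xedek/tconnectsync | api/ws2.py | _split_empty_sections
-- ===== SOURCE A (Python) =====
-- def _split_empty_sections(text):
--     sections = [[]]
--     sectionIndex = 0
--     for line in text.splitlines():
--         if len(line.strip()) > 0:
--             sections[sectionIndex].append(line)
--         else:
--             sections.append([])
--             sectionIndex += 1
--
--     return sections + [None] * (4 - len(sections))
-- ===== SOURCE B (Python) =====
-- def _split_empty_sections(text):
--     def go(lines):
--         if not lines:
--             return [[]]
--         head, rest = lines[0], lines[1:]
--         if head.strip():
--             first, *more = go(rest)
--             return [[head] + first] + more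
--         return [[]] + go(rest)
--
--     secs = go(text.splitlines())
--     return secs + [None] * (4 - len(secs))
-- ===== Notes on version B (the rewrite author's own statement) =====
-- stated objective: simpler
-- what changed: Replaced A's loop that mutates a growing list of sections through an explicit section index with a pure structural recursion over the lines that builds the sections front-first.
import Mathlib
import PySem

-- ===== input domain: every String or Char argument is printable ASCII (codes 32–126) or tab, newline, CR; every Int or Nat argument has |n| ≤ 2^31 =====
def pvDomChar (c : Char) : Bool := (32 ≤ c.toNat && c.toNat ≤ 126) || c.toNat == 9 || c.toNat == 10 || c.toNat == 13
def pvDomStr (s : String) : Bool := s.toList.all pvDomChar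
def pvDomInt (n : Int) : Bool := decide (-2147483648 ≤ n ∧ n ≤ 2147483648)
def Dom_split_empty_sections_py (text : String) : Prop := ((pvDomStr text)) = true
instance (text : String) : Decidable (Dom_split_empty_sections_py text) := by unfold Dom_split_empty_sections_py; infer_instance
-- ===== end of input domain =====

-- B replaces A's loop over an index-updated, growing list of sections by a direct structural
-- recursion on the lines that builds the sections front-first (objective: simpler decomposition).


-- ===== PORT A =====
-- for line in text.splitlines(): if len(line.strip()) > 0: sections[sectionIndex].append(line)
--                                else: sections.append([]); sectionIndex += 1
def split_empty_sections_py (text : String) : List (Option (List String)) :=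
  let st :=
    (PySem.Str.splitlines text).foldl
      (fun (st : List (List String) × Nat) line =>
        if 0 < PySem.Str.len (PySem.Str.strip line) then
          (st.1.modify st.2 (· ++ [line]), st.2)
        else
          (st.1 ++ [[]], st.2 + 1))
      ([[]], 0)
  let sections := st.1
  sections.map some ++ List.replicate (4 - sections.length) none

-- ===== PORT B =====
-- def go(lines): if not lines: return [[]]
--                head, rest = lines[0], lines[1:]
--                if head.strip(): first, *more = go(rest); return [[head] + first] + more
--                return [[]] + go(rest)
def pvGo (lines : List String) : List (List String) :=
  match lines with
  | [] => [[]]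
  | head :: rest =>
    if PySem.Str.strip head ≠ "" then
      match pvGo rest with
      | first :: more => ([head] ++ first) :: more
      | [] => [[head]]      -- unreachable: pvGo always returns a nonempty list (star-unpack never fails)
    else
      [[]] ++ pvGo rest

def split_empty_sections_py_alt (text : String) : List (Option (List String)) :=
  let secs := pvGo (PySem.Str.splitlines text)
  secs.map some ++ List.replicate (4 - secs.length) none

-- ===== PRECONDITION & SPEC =====
def Spec_split_empty_sections_py (text : String) (out : List (Option (List String))) : Prop := out = split_empty_sections_py_alt text
instance (text : String) (out : List (Option (List String))) : Decidable (Spec_split_empty_sections_py text out) := by unfold Spec_split_empty_sections_py; infer_instance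

-- ===== CLAIM (what is proved, stated in full; the proofs are below) =====
def Claim_equal_split_empty_sections_py : Prop := ∀ (text : String), Dom_split_empty_sections_py text → Spec_split_empty_sections_py text (split_empty_sections_py text)

-- ===== LEMMAS AND PROOFS =====
theorem pvGo_ne_nil (lines : List String) : pvGo lines ≠ [] := by
  induction lines with
  | nil => simp [pvGo]
  | cons head rest ih =>
    unfold pvGo
    split
    · cases h : pvGo rest with
      | nil => simp
      | cons f m => simp
    · simp

theorem modify_append_singleton {α : Type} (ss : List α) (cur : α) (f : α → α) :
    (ss ++ [cur]).modify ss.length f = ss ++ [f cur] := by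
  induction ss with
  | nil => simp [List.modify]
  | cons x xs ih => simpa [List.modify] using ih

-- glue cur s prepends cur to the first section of s
def pvGlue (cur : List String) (s : List (List String)) : List (List String) :=
  match s with
  | [] => [cur]
  | first :: more => (cur ++ first) :: more

theorem pvGo_cons_nonblank (head : String) (rest : List String) (f : List String)
    (m : List (List String)) (hb : PySem.Str.strip head ≠ "") (h : pvGo rest = f :: m) :
    pvGo (head :: rest) = ([head] ++ f) :: m := by
  unfold pvGo; rw [if_pos hb, h]

theorem pvGo_cons_blank (head : String) (rest : List String)
    (hb : ¬ PySem.Str.strip head ≠ "") :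
    pvGo (head :: rest) = [] :: pvGo rest := by
  conv_lhs => unfold pvGo
  rw [if_neg hb]
  rfl

theorem foldl_go (lines : List String) :
    ∀ (ss : List (List String)) (cur : List String),
    lines.foldl
      (fun (st : List (List String) × Nat) line =>
        if 0 < PySem.Str.len (PySem.Str.strip line) then
          (st.1.modify st.2 (· ++ [line]), st.2)
        else
          (st.1 ++ [[]], st.2 + 1))
      (ss ++ [cur], ss.length)
    = (ss ++ pvGlue cur (pvGo lines), ss.length + (pvGo lines).length - 1) := by
  induction lines with
  | nil => intro ss cur; simp [pvGo, pvGlue]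
  | cons head rest ih =>
    intro ss cur
    have hlen : (0 < PySem.Str.len (PySem.Str.strip head)) ↔ PySem.Str.strip head ≠ "" := by
      rw [PySem.Str.len]
      constructor
      · intro h hempty; rw [hempty] at h; simp at h
      · intro h
        have : (PySem.Str.strip head).toList ≠ [] := by
          intro hnil
          apply h
          have := congrArg String.ofList hnil
          simpa [PySem.Str.strip] using this
        have : 0 < (PySem.Str.strip head).toList.length := List.length_pos_iff.mpr this
        exact_mod_cast this
    simp only [List.foldl_cons]
    by_cases hb : PySem.Str.strip head ≠ ""
    · rw [if_pos (hlen.mpr hb)]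
      rw [modify_append_singleton]
      rw [ih ss (cur ++ [head])]
      cases h : pvGo rest with
      | nil => exact absurd h (pvGo_ne_nil rest)
      | cons f m => rw [pvGo_cons_nonblank head rest f m hb h]; simp [pvGlue]
    · rw [if_neg (fun h => hb (hlen.mp h))]
      have : ss ++ [cur] ++ [[]] = (ss ++ [cur]) ++ [([] : List String)] := by simp
      rw [this]
      have hl : ss.length + 1 = (ss ++ [cur]).length := by simp
      rw [hl, ih (ss ++ [cur]) []]
      rw [pvGo_cons_blank head rest hb]
      cases h : pvGo rest with
      | nil => exact absurd h (pvGo_ne_nil rest)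
      | cons f m =>
        simp [pvGlue]
        omega

theorem sections_eq (lines : List String) :
    (lines.foldl
      (fun (st : List (List String) × Nat) line =>
        if 0 < PySem.Str.len (PySem.Str.strip line) then
          (st.1.modify st.2 (· ++ [line]), st.2)
        else
          (st.1 ++ [[]], st.2 + 1))
      ([[]], 0)).1 = pvGo lines := by
  have := foldl_go lines [] []
  simp only [List.nil_append, List.length_nil] at this
  rw [this]
  cases h : pvGo lines with
  | nil => exact absurd h (pvGo_ne_nil lines)
  | cons f m => simp [pvGlue]

-- ===== VERDICT (by name: the statement is the Claim_ definition above) =====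
theorem split_empty_sections_py_spec : Claim_equal_split_empty_sections_py := by
  intro text _
  unfold Spec_split_empty_sections_py split_empty_sections_py split_empty_sections_py_alt
  simp only [sections_eq]
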